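-- pv_equiv track=rewrite | github.com/Warlord1986pl/MTG-Score-Tracker | source/app/core/card_tools.py | choose_reference_card_names
-- ===== SOURCE A (Python) =====
-- LAND_HINTS = {
--     "plains",
--     "island",
--     "swamp",
--     "mountain",
--     "forest",
--     "mesa",
--     "strand",
--     "foothills",
--     "vents",
--     "shrine",
--     "garden",
--     "triome",
--     "headquarters",
--     "falls",
--     "crypt",
--     "arena",
--     "flat",
--     "marsh",
-- }
--
-- def _unique_preserve_order(values: list[str]) -> list[str]:
--     seen: set[str] = set()
--     ordered: list[str] = []
--     for value in values:
--         item = str(value).strip()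
--         if not item:
--             continue
--         key = item.lower()
--         if key in seen:
--             continue
--         seen.add(key)
--         ordered.append(item)
--     return ordered
--
-- def choose_reference_card_names(card_names: list[str], max_cards: int = 8) -> list[str]:
--     nonlands: list[str] = []
--     lands: list[str] = []
--     for card_name in _unique_preserve_order(card_names):
--         lowered = card_name.lower()
--         if any(hint in lowered for hint in LAND_HINTS):
--             lands.append(card_name)
--         else:
--             nonlands.append(card_name)
--     return (nonlands + lands)[:max_cards]
-- ===== SOURCE B (Python) =====
-- LAND_HINTS = {
--     "plains", "island", "swamp", "mountain", "forest", "mesa", "strand",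
--     "foothills", "vents", "shrine", "garden", "triome", "headquarters",
--     "falls", "crypt", "arena", "flat", "marsh",
-- }
--
-- def choose_reference_card_names(card_names: list[str], max_cards: int = 8) -> list[str]:
--     # Dedup via a dict keyed by the lowered name (keeps first original-cased occurrence),
--     # then one stable sort with a boolean "is land" key replaces the two-bucket partition.
--     seen: dict[str, str] = {}
--     for value in card_names:
--         item = str(value).strip()
--         if item and item.lower() not in seen:
--             seen[item.lower()] = item
--     return sorted(seen.values(),
--                   key=lambda n: any(h in n.lower() for h in LAND_HINTS))[:max_cards]
-- ===== Notes on version B (the rewrite author's own statement) =====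
-- stated objective: idiomatic
-- what changed: The explicit two-bucket partition loop is replaced by a single stable sort keyed on the boolean 'name contains a land hint', and the set+parallel-list dedup is replaced by a dict keyed on the lowered name whose values are the kept names.
import Mathlib
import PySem

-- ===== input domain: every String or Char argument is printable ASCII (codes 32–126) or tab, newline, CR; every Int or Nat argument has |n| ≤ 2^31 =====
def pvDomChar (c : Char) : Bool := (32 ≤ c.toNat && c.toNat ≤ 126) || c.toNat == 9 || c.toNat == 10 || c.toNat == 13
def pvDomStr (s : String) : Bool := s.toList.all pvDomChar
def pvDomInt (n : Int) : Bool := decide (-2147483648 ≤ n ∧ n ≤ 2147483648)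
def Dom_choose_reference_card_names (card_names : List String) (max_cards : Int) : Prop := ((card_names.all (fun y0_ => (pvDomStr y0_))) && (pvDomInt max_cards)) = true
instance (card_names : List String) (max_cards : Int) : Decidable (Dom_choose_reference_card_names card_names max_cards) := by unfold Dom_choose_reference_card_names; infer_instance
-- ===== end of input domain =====

-- B replaces A's explicit two-bucket partition loop by one stable sort with a boolean
-- "is land" key (and dedups via a dict instead of a set+list pair): same values, more idiomatic.

-- ===== PORT A =====
-- LAND_HINTS (a Python set; only membership-independent `any` iterates it, so a distinct-element list is exact)
def landHints : List String := ["plains", "island", "swamp", "mountain", "forest", "mesa", "strand", "foothills", "vents", "shrine", "garden", "triome", "headquarters", "falls", "crypt", "arena", "flat", "marsh"]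

-- _unique_preserve_order
def uniquePreserveOrder (values : List String) : List String :=
  (values.foldl (fun (st : PySem.Set String × List String) value =>
      let item := PySem.Str.strip value
      if item = "" then st
      else
        let key := PySem.Str.lower item
        if PySem.Set.contains st.1 key then st
        else (PySem.Set.add st.1 key, st.2 ++ [item]))
    (PySem.Set.empty, [])).2

def choose_reference_card_names (card_names : List String) (max_cards : Int) : List String :=
  let st := (uniquePreserveOrder card_names).foldl
    (fun (st : List String × List String) card_name =>
      let lowered := PySem.Str.lower card_name
      if landHints.any (fun hint => PySem.Str.isIn hint lowered) then (st.1, st.2 ++ [card_name])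
      else (st.1 ++ [card_name], st.2))
    ([], [])
  PySem.List.slice (st.1 ++ st.2) none (some max_cards)

-- ===== PORT B =====
def choose_reference_card_names_alt (card_names : List String) (max_cards : Int) : List String :=
  let seen := card_names.foldl
    (fun (seen : PySem.Dict String String) value =>
      let item := PySem.Str.strip value
      if item ≠ "" ∧ seen.contains (PySem.Str.lower item) = false
      then seen.insert (PySem.Str.lower item) item
      else seen)
    PySem.Dict.empty
  PySem.List.slice
    (PySem.List.sorted seen.values
      (fun n => if landHints.any (fun h => PySem.Str.isIn h (PySem.Str.lower n)) then (1 : Int) else 0)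
      false)
    none (some max_cards)

-- ===== PRECONDITION & SPEC =====
def Spec_choose_reference_card_names (card_names : List String) (max_cards : Int) (out : List String) : Prop := out = choose_reference_card_names_alt card_names max_cards
instance (card_names : List String) (max_cards : Int) (out : List String) : Decidable (Spec_choose_reference_card_names card_names max_cards out) := by unfold Spec_choose_reference_card_names; infer_instance

-- ===== CLAIM (what is proved, stated in full; the proofs are below) =====
def Claim_equal_choose_reference_card_names : Prop := ∀ (card_names : List String) (max_cards : Int), Dom_choose_reference_card_names card_names max_cards → Spec_choose_reference_card_names card_names max_cards (choose_reference_card_names card_names max_cards)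

-- ===== LEMMAS AND PROOFS =====

-- A's set+list dedup loop and B's dict dedup loop keep the same (keys, values) state.
theorem dedup_state_eq (values : List String) (d : PySem.Dict String String) :
    values.foldl (fun (st : PySem.Set String × List String) value =>
        let item := PySem.Str.strip value
        if item = "" then st
        else
          let key := PySem.Str.lower item
          if PySem.Set.contains st.1 key then st
          else (PySem.Set.add st.1 key, st.2 ++ [item]))
      (d.keys, d.values)
    = ((values.foldl (fun (seen : PySem.Dict String String) value =>
          let item := PySem.Str.strip value
          if item ≠ "" ∧ seen.contains (PySem.Str.lower item) = false
          then seen.insert (PySem.Str.lower item) item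
          else seen) d).keys,
       (values.foldl (fun (seen : PySem.Dict String String) value =>
          let item := PySem.Str.strip value
          if item ≠ "" ∧ seen.contains (PySem.Str.lower item) = false
          then seen.insert (PySem.Str.lower item) item
          else seen) d).values) := by
  induction values generalizing d with
  | nil => rfl
  | cons v t ih =>
    simp only [List.foldl_cons]
    by_cases h0 : PySem.Str.strip v = ""
    · simpa [h0] using ih d
    · by_cases hk : PySem.Str.lower (PySem.Str.strip v) ∈ d.keys
      · have hc : d.contains (PySem.Str.lower (PySem.Str.strip v)) = true :=
          (PySem.Dict.contains_iff_mem_keys _ _).mpr hk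
        simpa [h0, hc, hk] using ih d
      · have hc : d.contains (PySem.Str.lower (PySem.Str.strip v)) = false := by
          rcases Bool.eq_false_or_eq_true (d.contains (PySem.Str.lower (PySem.Str.strip v))) with h | h
          · exact absurd ((PySem.Dict.contains_iff_mem_keys _ _).mp h) hk
          · exact h
        have hkeys : (d.insert (PySem.Str.lower (PySem.Str.strip v)) (PySem.Str.strip v)).keys
            = d.keys ++ [PySem.Str.lower (PySem.Str.strip v)] :=
          PySem.Dict.keys_insert_of_not_contains d _ hc
        have hvals : (d.insert (PySem.Str.lower (PySem.Str.strip v)) (PySem.Str.strip v)).values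
            = d.values ++ [PySem.Str.strip v] := by
          simp [PySem.Dict.values, PySem.Dict.items_insert_of_not_contains d _ hc]
        have hadd : PySem.Set.add d.keys (PySem.Str.lower (PySem.Str.strip v))
            = d.keys ++ [PySem.Str.lower (PySem.Str.strip v)] :=
          PySem.Set.add_of_not_mem hk
        have := ih (d.insert (PySem.Str.lower (PySem.Str.strip v)) (PySem.Str.strip v))
        simpa [h0, hc, hk, hadd, hkeys, hvals] using this

-- A's partition loop = the two filters, appended to the accumulator.
theorem partition_foldl (land : String → Bool) (l : List String) (acc : List String × List String) :
    l.foldl (fun (st : List String × List String) n =>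
        if land n then (st.1, st.2 ++ [n]) else (st.1 ++ [n], st.2)) acc
    = (acc.1 ++ l.filter (fun n => !land n), acc.2 ++ l.filter land) := by
  induction l generalizing acc with
  | nil => simp
  | cons n t ih => by_cases h : land n <;> simp [h, ih]

theorem insertBy_middle {α : Type} (before : α → α → Bool) (x : α) (A B : List α)
    (hA : ∀ a ∈ A, before x a = false) (hB : ∀ b ∈ B, before x b = true) :
    PySem.List.insertBy before x (A ++ B) = A ++ x :: B := by
  induction A with
  | nil =>
    cases B with
    | nil => simp [PySem.List.insertBy]
    | cons b t => simp [PySem.List.insertBy, hB b (by simp)]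
  | cons a A' ih =>
    have h := hA a (by simp)
    simp only [List.cons_append, PySem.List.insertBy, h, Bool.false_eq_true, if_false]
    exact congrArg (a :: ·) (ih (fun y hy => hA y (by simp [hy])))

-- Python's stable sort with a {0,1} key is exactly "non-matching first, matching last".
theorem sorted_bool_key {α : Type} (p : α → Bool) (xs : List α) :
    PySem.List.sorted xs (fun x => if p x then (1 : Int) else 0) false
      = xs.filter (fun x => !p x) ++ xs.filter p := by
  rw [PySem.List.sorted_eq_foldl_insertBy]
  induction xs using List.reverseRecOn with
  | nil => simp
  | append_singleton xs x ih =>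
    rw [List.foldl_append, List.foldl_cons, List.foldl_nil, ih]
    by_cases hx : p x = true
    · rw [PySem.List.insertBy_of_forall_not_before]
      · simp [List.filter_append, hx, List.append_assoc]
      · intro y hy
        by_cases hy' : p y = true <;> simp [hx, hy']
    · rw [insertBy_middle _ _ _ _ ?_ ?_]
      · simp [List.filter_append, hx]
      · intro a ha
        have : ¬ p a = true := by simpa using (List.mem_filter.mp ha).2
        simp [hx, this]
      · intro b hb
        have : p b = true := by simpa using (List.mem_filter.mp hb).2
        simp [hx, this]

-- ===== VERDICT (by name: the statement is the Claim_ definition above) =====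
theorem choose_reference_card_names_spec : Claim_equal_choose_reference_card_names := by
  intro card_names max_cards _
  unfold Spec_choose_reference_card_names choose_reference_card_names
    choose_reference_card_names_alt uniquePreserveOrder
  dsimp only
  have hdedup := dedup_state_eq card_names PySem.Dict.empty
  simp only [show (PySem.Dict.empty : PySem.Dict String String).keys = PySem.Set.empty from rfl,
    show (PySem.Dict.empty : PySem.Dict String String).values = ([] : List String) from rfl] at hdedup
  rw [show ((PySem.Set.empty : PySem.Set String), ([] : List String))
        = ((PySem.Dict.empty : PySem.Dict String String).keys,
           (PySem.Dict.empty : PySem.Dict String String).values) from rfl] at hdedup ⊢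
  rw [hdedup]
  rw [partition_foldl (fun n => landHints.any (fun hint => PySem.Str.isIn hint (PySem.Str.lower n)))]
  rw [sorted_bool_key (fun n => landHints.any (fun h => PySem.Str.isIn h (PySem.Str.lower n)))]
  simp
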